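-- pv_equiv track=rewrite | github.com/Evgya/Python | Yandex_training_1.0/6/I. Cleaning day/Cleaning_day.py | get_min_discomfort
-- ===== SOURCE A (Python) =====
-- def count_crews(heights, C, comfort):
--     crew_count = 0
--     i = 0
--     while i < len(heights) - C + 1:
--         if heights[i + C - 1] - heights[i] <= comfort:
--             crew_count += 1
--             i += C
--         else:
--             i += 1
--     return crew_count
--
-- def get_min_discomfort(heights, R, C):
--     left_border = 0
--     right_border = heights[-1] - heights[0]
--     while left_border < right_border:
--         middle = (left_border + right_border)//2
--         if count_crews(heights, C, middle) >= R:
--             right_border = middle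
--         else:
--             left_border = middle + 1
--     return left_border
-- ===== SOURCE B (Python) =====
-- def _crews(heights, C, d):
--     limit = len(heights) - C + 1
--     count = 0
--     i = 0
--     while i < limit:
--         if heights[i + C - 1] - heights[i] <= d:
--             count += 1
--             i += C
--         else:
--             i += 1
--     return count
--
-- def get_min_discomfort(heights, R, C):
--     total = heights[-1] - heights[0]
--     if total <= 0:
--         return 0
--     n = len(heights)
--     # every feasible threshold flip happens at a window difference, so it is
--     # enough to binary-search the sorted candidate table instead of [0, total]
--     diffs = (heights[i + C - 1] - heights[i] for i in range(n - C + 1))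
--     cands = sorted({0, *(d for d in diffs if 0 < d < total)})
--     lo, hi = 0, len(cands)
--     while lo < hi:
--         mid = (lo + hi) // 2
--         if _crews(heights, C, cands[mid]) >= R:
--             hi = mid
--         else:
--             lo = mid + 1
--     return cands[lo] if lo < len(cands) else total
-- ===== Notes on version B (the rewrite author's own statement) =====
-- stated objective: alternative
-- what changed: Instead of binary-searching the raw integer range [0, heights[-1]-heights[0]], B precomputes the sorted deduplicated table of candidate answers (0 plus all in-range window differences heights[i+C-1]-heights[i]) and binary-searches that table with the same greedy feasibility count, falling back to the full range when no candidate reaches R crews.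
import Mathlib
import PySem

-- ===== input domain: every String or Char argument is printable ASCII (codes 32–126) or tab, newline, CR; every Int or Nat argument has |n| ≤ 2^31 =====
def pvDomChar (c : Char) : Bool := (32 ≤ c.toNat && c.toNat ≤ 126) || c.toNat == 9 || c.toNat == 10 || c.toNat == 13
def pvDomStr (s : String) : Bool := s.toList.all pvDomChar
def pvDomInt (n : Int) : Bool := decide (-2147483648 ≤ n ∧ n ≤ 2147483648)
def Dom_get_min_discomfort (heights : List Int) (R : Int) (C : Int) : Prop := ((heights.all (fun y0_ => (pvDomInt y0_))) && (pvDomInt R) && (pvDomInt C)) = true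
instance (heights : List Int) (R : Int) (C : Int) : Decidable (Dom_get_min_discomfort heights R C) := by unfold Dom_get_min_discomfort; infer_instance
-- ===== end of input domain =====

-- B binary-searches a sorted table of candidate window differences instead of the raw
-- value range [0, heights[-1]-heights[0]]; objective: alternative search strategy.

-- ===== PORT A =====
-- the while-loop of count_crews; fuel only makes the recursion total (ample inside Pre_)
def count_crews_loop (heights : List Int) (C comfort : Int) : Nat → Int → Int → Int
  | 0, _, crew_count => crew_count
  | fuel+1, i, crew_count =>
    if i < (heights.length : Int) - C + 1 then
      if PySem.List.pyGetD heights (i + C - 1) 0 - PySem.List.pyGetD heights i 0 ≤ comfort then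
        count_crews_loop heights C comfort fuel (i + C) (crew_count + 1)
      else
        count_crews_loop heights C comfort fuel (i + 1) crew_count
    else crew_count

def count_crews (heights : List Int) (C comfort : Int) : Int :=
  count_crews_loop heights C comfort (heights.length + 1) 0 0

def gmd_loop (heights : List Int) (R C left_border right_border : Int) : Int :=
  if _h : left_border < right_border then
    let middle := PySem.Int.floordiv (left_border + right_border) 2
    if R ≤ count_crews heights C middle then
      gmd_loop heights R C left_border middle
    else
      gmd_loop heights R C (middle + 1) right_border
  else left_border
termination_by (right_border - left_border).toNat
decreasing_by
  all_goals
    have hm : PySem.Int.floordiv (left_border + right_border) 2 = (left_border + right_border) / 2 :=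
      PySem.Int.floordiv_eq_ediv_of_pos (by norm_num)
    simp only [middle, hm] at *
    omega

def get_min_discomfort (heights : List Int) (R : Int) (C : Int) : Int :=
  gmd_loop heights R C 0 (PySem.List.pyGetD heights (-1) 0 - PySem.List.pyGetD heights 0 0)

-- ===== PORT B =====
def crews_alt_loop (heights : List Int) (C d limit : Int) : Nat → Int → Int → Int
  | 0, _, count => count
  | fuel+1, i, count =>
    if i < limit then
      if PySem.List.pyGetD heights (i + C - 1) 0 - PySem.List.pyGetD heights i 0 ≤ d then
        crews_alt_loop heights C d limit fuel (i + C) (count + 1)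
      else
        crews_alt_loop heights C d limit fuel (i + 1) count
    else count

def crews_alt (heights : List Int) (C d : Int) : Int :=
  crews_alt_loop heights C d ((heights.length : Int) - C + 1) (heights.length + 1) 0 0

-- the while-loop over the candidate table (lo, hi are Python ints)
def bsl_loop (heights : List Int) (R C : Int) (cands : List Int) (lo hi : Int) : Int :=
  if _h : lo < hi then
    let mid := PySem.Int.floordiv (lo + hi) 2
    if R ≤ crews_alt heights C (PySem.List.pyGetD cands mid 0) then
      bsl_loop heights R C cands lo mid
    else
      bsl_loop heights R C cands (mid + 1) hi
  else lo
termination_by (hi - lo).toNat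
decreasing_by
  all_goals
    have hm : PySem.Int.floordiv (lo + hi) 2 = (lo + hi) / 2 :=
      PySem.Int.floordiv_eq_ediv_of_pos (by norm_num)
    simp only [mid, hm] at *
    omega

def get_min_discomfort_alt (heights : List Int) (R : Int) (C : Int) : Int :=
  let total := PySem.List.pyGetD heights (-1) 0 - PySem.List.pyGetD heights 0 0
  if total ≤ 0 then 0
  else
    let n : Int := heights.length
    let diffs := (PySem.List.pyRange 0 (n - C + 1) 1).map
      (fun i => PySem.List.pyGetD heights (i + C - 1) 0 - PySem.List.pyGetD heights i 0)
    let cands := PySem.List.sorted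
      (PySem.Set.ofList (0 :: diffs.filter (fun d => decide (0 < d ∧ d < total)))) (fun x => x) false
    let lo := bsl_loop heights R C cands 0 (cands.length : Int)
    if lo < (cands.length : Int) then PySem.List.pyGetD cands lo 0 else total

-- ===== PRECONDITION & SPEC =====
-- Pre_ excludes empty heights (heights[-1] raises IndexError) and C ≤ 0 when the height
-- range is positive: there count_crews steps by a non-positive amount, so A diverges or
-- raises IndexError and never returns (verified empirically and by the step analysis).
def Pre_get_min_discomfort (heights : List Int) (R : Int) (C : Int) : Prop :=
  heights ≠ [] ∧ (1 ≤ C ∨ heights.getLastD 0 ≤ heights.headD 0)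

instance (heights : List Int) (R : Int) (C : Int) : Decidable (Pre_get_min_discomfort heights R C) := by
  unfold Pre_get_min_discomfort; infer_instance

def pvWitness_get_min_discomfort : List Int × Int × Int := ([1, 2, 4, 7], 2, 2)

def Spec_get_min_discomfort (heights : List Int) (R : Int) (C : Int) (out : Int) : Prop := out = get_min_discomfort_alt heights R C
instance (heights : List Int) (R : Int) (C : Int) (out : Int) : Decidable (Spec_get_min_discomfort heights R C out) := by unfold Spec_get_min_discomfort; infer_instance

-- ===== CLAIM (what is proved, stated in full; the proofs are below) =====
def Claim_equal_get_min_discomfort : Prop := ∀ (heights : List Int) (R : Int) (C : Int), Dom_get_min_discomfort heights R C → Pre_get_min_discomfort heights R C → Spec_get_min_discomfort heights R C (get_min_discomfort heights R C)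

-- ===== LEMMAS AND PROOFS =====

-- proof-side pure count: crews counted from position i (step max C 1 keeps it total; = C when 1 ≤ C)
def gcount (heights : List Int) (C d : Int) (i : Int) : Int :=
  if _h : i < (heights.length : Int) - C + 1 then
    if PySem.List.pyGetD heights (i + C - 1) 0 - PySem.List.pyGetD heights i 0 ≤ d then
      1 + gcount heights C d (i + max C 1)
    else gcount heights C d (i + 1)
  else 0
termination_by ((heights.length : Int) - C + 1 - i).toNat
decreasing_by
  all_goals
    have h1 : (1 : Int) ≤ max C 1 := le_max_right _ _
    omega

theorem gcount_nonneg (heights : List Int) (C d i : Int) : 0 ≤ gcount heights C d i := by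
  induction hn : ((heights.length : Int) - C + 1 - i).toNat using Nat.strong_induction_on generalizing i with
  | _ n ih =>
    rw [gcount]
    split_ifs with h1 h2
    · have hmax : (1 : Int) ≤ max C 1 := le_max_right _ _
      have := ih (((heights.length : Int) - C + 1 - (i + max C 1)).toNat) (by omega) (i + max C 1) rfl
      omega
    · exact ih (((heights.length : Int) - C + 1 - (i + 1)).toNat) (by omega) (i + 1) rfl
    · omega

theorem gcount_of_ge (heights : List Int) (C d i : Int)
    (h : (heights.length : Int) - C + 1 ≤ i) : gcount heights C d i = 0 := by
  rw [gcount]; simp [not_lt.mpr h]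

theorem count_crews_loop_eq_gcount (heights : List Int) (C d : Int) (hC : 1 ≤ C) :
    ∀ (fuel : Nat) (i crew : Int), ((heights.length : Int) - C + 1 - i).toNat ≤ fuel →
      count_crews_loop heights C d fuel i crew = crew + gcount heights C d i := by
  intro fuel
  induction fuel with
  | zero =>
    intro i crew hf
    have h0 : (heights.length : Int) - C + 1 ≤ i := by omega
    rw [count_crews_loop, gcount_of_ge heights C d i h0]
    omega
  | succ fuel ih =>
    intro i crew hf
    rw [count_crews_loop]
    rw [gcount]
    have hmax : max C 1 = C := max_eq_left hC
    split_ifs with h1 h2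
    · rw [ih (i + C) (crew + 1) (by omega), hmax]
      ring
    · rw [ih (i + 1) crew (by omega)]
    · ring

theorem count_crews_eq_gcount (heights : List Int) (C d : Int) (hC : 1 ≤ C) :
    count_crews heights C d = gcount heights C d 0 := by
  have := count_crews_loop_eq_gcount heights C d hC (heights.length + 1) 0 0 (by omega)
  simpa [count_crews] using this

theorem crews_alt_loop_eq_gcount (heights : List Int) (C d : Int) (hC : 1 ≤ C) :
    ∀ (fuel : Nat) (i count : Int), ((heights.length : Int) - C + 1 - i).toNat ≤ fuel →
      crews_alt_loop heights C d ((heights.length : Int) - C + 1) fuel i count =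
        count + gcount heights C d i := by
  intro fuel
  induction fuel with
  | zero =>
    intro i count hf
    have h0 : (heights.length : Int) - C + 1 ≤ i := by omega
    rw [crews_alt_loop, gcount_of_ge heights C d i h0]
    omega
  | succ fuel ih =>
    intro i count hf
    rw [crews_alt_loop, gcount]
    have hmax : max C 1 = C := max_eq_left hC
    split_ifs with h1 h2
    · rw [ih (i + C) (count + 1) (by omega), hmax]
      ring
    · rw [ih (i + 1) count (by omega)]
    · ring

theorem crews_alt_eq_gcount (heights : List Int) (C d : Int) (hC : 1 ≤ C) :
    crews_alt heights C d = gcount heights C d 0 := by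
  have := crews_alt_loop_eq_gcount heights C d hC (heights.length + 1) 0 0 (by omega)
  simpa [crews_alt] using this

-- shift (S) and antitone (T) lemmas, proved together by strong induction on the start index
theorem gcount_ST (heights : List Int) (C d : Int) (hC : 1 ≤ C) (i : Int) :
    (∀ j, i ≤ j → j ≤ i + C → gcount heights C d i ≤ 1 + gcount heights C d j) ∧
    (∀ j, i ≤ j → gcount heights C d j ≤ gcount heights C d i) := by
  have hmax : max C 1 = C := max_eq_left hC
  induction hn : ((heights.length : Int) - C + 1 - i).toNat using Nat.strong_induction_on generalizing i with
  | _ n ih =>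
    by_cases hb : i < (heights.length : Int) - C + 1
    case neg =>
      have hz : gcount heights C d i = 0 := gcount_of_ge _ _ _ _ (by omega)
      constructor
      · intro j _ _; have := gcount_nonneg heights C d j; omega
      · intro j h1
        have hzj : gcount heights C d j = 0 := gcount_of_ge _ _ _ _ (by omega)
        omega
    case pos =>
      have IH : ∀ i' : Int, i < i' →
          (∀ j, i' ≤ j → j ≤ i' + C → gcount heights C d i' ≤ 1 + gcount heights C d j) ∧
          (∀ j, i' ≤ j → gcount heights C d j ≤ gcount heights C d i') := by
        intro i' hi'
        exact ih (((heights.length : Int) - C + 1 - i').toNat) (by omega) i' rfl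
      by_cases hq : PySem.List.pyGetD heights (i + C - 1) 0 - PySem.List.pyGetD heights i 0 ≤ d
      case pos =>
        have hgi : gcount heights C d i = 1 + gcount heights C d (i + C) := by
          rw [gcount, dif_pos hb, if_pos hq, hmax]
        constructor
        · intro j h1 h2
          rcases eq_or_lt_of_le h1 with rfl | hlt
          · have := gcount_nonneg heights C d i; omega
          · have hT := (IH j hlt).2 (i + C) h2
            rw [hgi]; omega
        · intro j h1
          rcases eq_or_lt_of_le h1 with rfl | hlt
          · exact le_refl _
          · by_cases hjc : i + C ≤ j
            · have h1 := (IH (i + C) (by omega)).2 j hjc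
              rw [hgi]; omega
            · have hS := (IH j hlt).1 (i + C) (by omega) (by omega)
              rw [hgi]; omega
      case neg =>
        have hgi : gcount heights C d i = gcount heights C d (i + 1) := by
          rw [gcount, dif_pos hb, if_neg hq]
        constructor
        · intro j h1 h2
          rcases eq_or_lt_of_le h1 with rfl | hlt
          · have := gcount_nonneg heights C d i; omega
          · have hS := (IH (i + 1) (by omega)).1 j (by omega) (by omega)
            rw [hgi]; exact hS
        · intro j h1
          rcases eq_or_lt_of_le h1 with rfl | hlt
          · exact le_refl _
          · have hT := (IH (i + 1) (by omega)).2 j (by omega)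
            rw [hgi]; exact hT

theorem gcount_mono (heights : List Int) (C : Int) (hC : 1 ≤ C) (d1 d2 : Int) (hd : d1 ≤ d2)
    (i : Int) : gcount heights C d1 i ≤ gcount heights C d2 i := by
  have hmax : max C 1 = C := max_eq_left hC
  induction hn : ((heights.length : Int) - C + 1 - i).toNat using Nat.strong_induction_on generalizing i with
  | _ n ih =>
    by_cases hb : i < (heights.length : Int) - C + 1
    case neg =>
      rw [gcount_of_ge _ _ _ _ (by omega), gcount_of_ge _ _ _ _ (by omega)]
    case pos =>
      by_cases h1 : PySem.List.pyGetD heights (i + C - 1) 0 - PySem.List.pyGetD heights i 0 ≤ d1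
      · have h2 : PySem.List.pyGetD heights (i + C - 1) 0 - PySem.List.pyGetD heights i 0 ≤ d2 :=
          le_trans h1 hd
        have e1 : gcount heights C d1 i = 1 + gcount heights C d1 (i + C) := by
          rw [gcount, dif_pos hb, if_pos h1, hmax]
        have e2 : gcount heights C d2 i = 1 + gcount heights C d2 (i + C) := by
          rw [gcount, dif_pos hb, if_pos h2, hmax]
        have := ih (((heights.length : Int) - C + 1 - (i + C)).toNat) (by omega) (i + C) rfl
        omega
      · have e1 : gcount heights C d1 i = gcount heights C d1 (i + 1) := by
          rw [gcount, dif_pos hb, if_neg h1]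
        by_cases h2 : PySem.List.pyGetD heights (i + C - 1) 0 - PySem.List.pyGetD heights i 0 ≤ d2
        · have e2 : gcount heights C d2 i = 1 + gcount heights C d2 (i + C) := by
            rw [gcount, dif_pos hb, if_pos h2, hmax]
          have hS := (gcount_ST heights C d1 hC (i + 1)).1 (i + C) (by omega) (by omega)
          have hih := ih (((heights.length : Int) - C + 1 - (i + C)).toNat) (by omega) (i + C) rfl
          omega
        · have e2 : gcount heights C d2 i = gcount heights C d2 (i + 1) := by
            rw [gcount, dif_pos hb, if_neg h2]
          rw [e1, e2]
          exact ih (((heights.length : Int) - C + 1 - (i + 1)).toNat) (by omega) (i + 1) rfl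

theorem gcount_cong (heights : List Int) (C d1 d2 : Int)
    (hq : ∀ i : Int, 0 ≤ i → i < (heights.length : Int) - C + 1 →
      ((PySem.List.pyGetD heights (i + C - 1) 0 - PySem.List.pyGetD heights i 0 ≤ d1) ↔
       (PySem.List.pyGetD heights (i + C - 1) 0 - PySem.List.pyGetD heights i 0 ≤ d2)))
    (i : Int) (hi : 0 ≤ i) : gcount heights C d1 i = gcount heights C d2 i := by
  induction hn : ((heights.length : Int) - C + 1 - i).toNat using Nat.strong_induction_on generalizing i with
  | _ n ih =>
    by_cases hb : i < (heights.length : Int) - C + 1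
    case neg =>
      rw [gcount_of_ge _ _ _ _ (by omega), gcount_of_ge _ _ _ _ (by omega)]
    case pos =>
      have hmax : (1 : Int) ≤ max C 1 := le_max_right _ _
      have hiff := hq i hi hb
      by_cases h1 : PySem.List.pyGetD heights (i + C - 1) 0 - PySem.List.pyGetD heights i 0 ≤ d1
      · have h2 := hiff.mp h1
        have e1 : gcount heights C d1 i = 1 + gcount heights C d1 (i + max C 1) := by
          rw [gcount, dif_pos hb, if_pos h1]
        have e2 : gcount heights C d2 i = 1 + gcount heights C d2 (i + max C 1) := by
          rw [gcount, dif_pos hb, if_pos h2]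
        have := ih (((heights.length : Int) - C + 1 - (i + max C 1)).toNat) (by omega)
          (i + max C 1) (by omega) rfl
        omega
      · have h2 : ¬ PySem.List.pyGetD heights (i + C - 1) 0 - PySem.List.pyGetD heights i 0 ≤ d2 :=
          fun h => h1 (hiff.mpr h)
        have e1 : gcount heights C d1 i = gcount heights C d1 (i + 1) := by
          rw [gcount, dif_pos hb, if_neg h1]
        have e2 : gcount heights C d2 i = gcount heights C d2 (i + 1) := by
          rw [gcount, dif_pos hb, if_neg h2]
        rw [e1, e2]
        exact ih (((heights.length : Int) - C + 1 - (i + 1)).toNat) (by omega) (i + 1) (by omega) rfl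

-- if the count changes between d-1 and d, some window difference equals d exactly
theorem gcount_flip (heights : List Int) (C d : Int)
    (hne : gcount heights C (d-1) 0 ≠ gcount heights C d 0) :
    ∃ i : Int, 0 ≤ i ∧ i < (heights.length : Int) - C + 1 ∧
      PySem.List.pyGetD heights (i + C - 1) 0 - PySem.List.pyGetD heights i 0 = d := by
  by_contra hno
  push_neg at hno
  apply hne
  apply gcount_cong heights C (d - 1) d _ 0 (le_refl 0)
  intro i hi0 hib
  have := hno i hi0 hib
  omega

-- characterisation of A's binary search (needs monotonicity of the count)
theorem gmd_loop_char (heights : List Int) (R C : Int) (hC : 1 ≤ C) :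
    ∀ l r : Int, l ≤ r →
      l ≤ gmd_loop heights R C l r ∧ gmd_loop heights R C l r ≤ r ∧
      (∀ d, l ≤ d → d < gmd_loop heights R C l r → ¬ (R ≤ gcount heights C d 0)) ∧
      (gmd_loop heights R C l r < r → R ≤ gcount heights C (gmd_loop heights R C l r) 0) := by
  intro l r
  induction hn : (r - l).toNat using Nat.strong_induction_on generalizing l r with
  | _ n ih =>
    intro hlr
    by_cases hlt : l < r
    case neg =>
      have heq : gmd_loop heights R C l r = l := by rw [gmd_loop, dif_neg hlt]
      rw [heq]
      refine ⟨le_refl l, hlr, ?_, ?_⟩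
      · intro d h1 h2 _; omega
      · intro h2; omega
    case pos =>
      have hm2 : PySem.Int.floordiv (l + r) 2 = (l + r) / 2 :=
        PySem.Int.floordiv_eq_ediv_of_pos (by norm_num)
      set m := PySem.Int.floordiv (l + r) 2 with hmdef
      have hb1 : l ≤ m := by omega
      have hb2 : m < r := by omega
      have heq : gmd_loop heights R C l r =
          if R ≤ count_crews heights C m then gmd_loop heights R C l m
          else gmd_loop heights R C (m + 1) r := by
        rw [gmd_loop, dif_pos hlt]
      rw [count_crews_eq_gcount heights C m hC] at heq
      by_cases hP : R ≤ gcount heights C m 0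
      · rw [if_pos hP] at heq
        rw [heq]
        obtain ⟨a1, a2, a3, a4⟩ := ih ((m - l).toNat) (by omega) l m rfl hb1
        refine ⟨a1, by omega, a3, ?_⟩
        intro _
        rcases lt_or_eq_of_le a2 with h | h
        · exact a4 h
        · rw [h]; exact hP
      · rw [if_neg hP] at heq
        rw [heq]
        obtain ⟨a1, a2, a3, a4⟩ := ih ((r - (m + 1)).toNat) (by omega) (m + 1) r rfl (by omega)
        refine ⟨by omega, a2, ?_, a4⟩
        intro dd h1 h2 hPd
        by_cases hdm : dd ≤ m
        · exact hP (le_trans hPd (gcount_mono heights C hC dd m hdm 0))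
        · exact a3 dd (by omega) h2 hPd

-- a strictly increasing list is monotone under Python indexing
theorem cands_mono (cands : List Int) (hs : cands.Pairwise (· < ·)) (j k : Int)
    (h0 : 0 ≤ j) (hjk : j ≤ k) (hk : k < (cands.length : Int)) :
    PySem.List.pyGetD cands j 0 ≤ PySem.List.pyGetD cands k 0 := by
  rcases eq_or_lt_of_le hjk with rfl | h
  · exact le_refl _
  · rw [PySem.List.pyGetD_eq_getElem cands 0 h0 (by omega),
        PySem.List.pyGetD_eq_getElem cands 0 (by omega) hk]
    exact le_of_lt (List.pairwise_iff_getElem.mp hs j.toNat k.toNat (by omega) (by omega) (by omega))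

-- characterisation of B's binary search over a strictly increasing candidate list
theorem bsl_loop_char (heights : List Int) (R C : Int) (hC : 1 ≤ C) (cands : List Int)
    (hs : cands.Pairwise (· < ·)) :
    ∀ lo hi : Int, 0 ≤ lo → lo ≤ hi → hi ≤ (cands.length : Int) →
      lo ≤ bsl_loop heights R C cands lo hi ∧ bsl_loop heights R C cands lo hi ≤ hi ∧
      (∀ j, lo ≤ j → j < bsl_loop heights R C cands lo hi →
        ¬ (R ≤ gcount heights C (PySem.List.pyGetD cands j 0) 0)) ∧
      (bsl_loop heights R C cands lo hi < hi →
        R ≤ gcount heights C (PySem.List.pyGetD cands (bsl_loop heights R C cands lo hi) 0) 0) := by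
  intro lo hi
  induction hn : (hi - lo).toNat using Nat.strong_induction_on generalizing lo hi with
  | _ n ih =>
    intro h0 hlh hhl
    by_cases hlt : lo < hi
    case neg =>
      have heq : bsl_loop heights R C cands lo hi = lo := by rw [bsl_loop, dif_neg hlt]
      rw [heq]
      refine ⟨le_refl lo, hlh, ?_, ?_⟩
      · intro j h1 h2 _; omega
      · intro h2; omega
    case pos =>
      have hm2 : PySem.Int.floordiv (lo + hi) 2 = (lo + hi) / 2 :=
        PySem.Int.floordiv_eq_ediv_of_pos (by norm_num)
      set m := PySem.Int.floordiv (lo + hi) 2 with hmdef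
      have hb1 : lo ≤ m := by omega
      have hb2 : m < hi := by omega
      have heq : bsl_loop heights R C cands lo hi =
          if R ≤ crews_alt heights C (PySem.List.pyGetD cands m 0) then
            bsl_loop heights R C cands lo m
          else bsl_loop heights R C cands (m + 1) hi := by
        rw [bsl_loop, dif_pos hlt]
      rw [crews_alt_eq_gcount heights C _ hC] at heq
      by_cases hP : R ≤ gcount heights C (PySem.List.pyGetD cands m 0) 0
      · rw [if_pos hP] at heq
        rw [heq]
        obtain ⟨a1, a2, a3, a4⟩ := ih ((m - lo).toNat) (by omega) lo m rfl h0 hb1 (by omega)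
        refine ⟨a1, by omega, a3, ?_⟩
        intro _
        rcases lt_or_eq_of_le a2 with h | h
        · exact a4 h
        · rw [h]; exact hP
      · rw [if_neg hP] at heq
        rw [heq]
        obtain ⟨a1, a2, a3, a4⟩ := ih ((hi - (m + 1)).toNat) (by omega) (m + 1) hi rfl (by omega) (by omega) hhl
        refine ⟨by omega, a2, ?_, a4⟩
        intro j h1 h2 hPj
        by_cases hjm : j ≤ m
        · apply hP
          refine le_trans hPj (gcount_mono heights C hC _ _ ?_ 0)
          exact cands_mono cands hs j m (by omega) hjm (by omega)
        · exact a3 j (by omega) h2 hPj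

-- proof-side names for the values B computes
def totalOf (heights : List Int) : Int :=
  PySem.List.pyGetD heights (-1) 0 - PySem.List.pyGetD heights 0 0

def diffsOf (heights : List Int) (C : Int) : List Int :=
  (PySem.List.pyRange 0 ((heights.length : Int) - C + 1) 1).map
    (fun i => PySem.List.pyGetD heights (i + C - 1) 0 - PySem.List.pyGetD heights i 0)

def candsOf (heights : List Int) (C : Int) : List Int :=
  PySem.List.sorted
    (PySem.Set.ofList (0 :: (diffsOf heights C).filter
      (fun d => decide (0 < d ∧ d < totalOf heights)))) (fun x => x) false

theorem A_unfold (heights : List Int) (R C : Int) :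
    get_min_discomfort heights R C = gmd_loop heights R C 0 (totalOf heights) := rfl

theorem B_unfold (heights : List Int) (R C : Int) :
    get_min_discomfort_alt heights R C =
      if totalOf heights ≤ 0 then 0
      else
        if bsl_loop heights R C (candsOf heights C) 0 (((candsOf heights C).length : Int)) <
            (((candsOf heights C).length : Int)) then
          PySem.List.pyGetD (candsOf heights C)
            (bsl_loop heights R C (candsOf heights C) 0 (((candsOf heights C).length : Int))) 0
        else totalOf heights := rfl

theorem mem_candsOf (heights : List Int) (C x : Int) :
    x ∈ candsOf heights C ↔
      x = 0 ∨ (x ∈ diffsOf heights C ∧ 0 < x ∧ x < totalOf heights) := by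
  rw [candsOf, PySem.List.mem_sorted, PySem.Set.mem_ofList, List.mem_cons, List.mem_filter]
  simp only [decide_eq_true_eq]

theorem candsOf_pairwise (heights : List Int) (C : Int) :
    (candsOf heights C).Pairwise (· < ·) :=
  PySem.List.sorted_ofList_pairwise_lt _

theorem flip_in_cands (heights : List Int) (C d : Int) (h0 : 0 < d) (h1 : d < totalOf heights)
    (hne : gcount heights C (d - 1) 0 ≠ gcount heights C d 0) : d ∈ candsOf heights C := by
  obtain ⟨i, hi0, hib, hiw⟩ := gcount_flip heights C d hne
  rw [mem_candsOf]
  right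
  refine ⟨?_, h0, h1⟩
  rw [diffsOf]
  refine List.mem_map.mpr ⟨i, ?_, hiw⟩
  rw [PySem.List.mem_pyRange_one]
  exact ⟨hi0, hib⟩

theorem exists_cand_le (heights : List Int) (R C : Int) :
    ∀ d : Int, 0 ≤ d → d < totalOf heights → R ≤ gcount heights C d 0 →
      ∃ c ∈ candsOf heights C, c ≤ d ∧ R ≤ gcount heights C c 0 := by
  intro d
  induction hd : d.toNat using Nat.strong_induction_on generalizing d with
  | _ n ih =>
    intro h0 h1 hP
    rcases eq_or_lt_of_le h0 with h | hpos
    · refine ⟨0, (mem_candsOf heights C 0).mpr (Or.inl rfl), by omega, ?_⟩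
      rw [← h] at hP
      exact hP
    · by_cases hP' : R ≤ gcount heights C (d - 1) 0
      · obtain ⟨c, hc, hcle, hcP⟩ := ih (d - 1).toNat (by omega) (d - 1) rfl (by omega) (by omega) hP'
        exact ⟨c, hc, by omega, hcP⟩
      · have hne : gcount heights C (d - 1) 0 ≠ gcount heights C d 0 := by
          intro he; rw [he] at hP'; exact hP' hP
        exact ⟨d, flip_in_cands heights C d hpos h1 hne, le_refl d, hP⟩

theorem cands_bounds (heights : List Int) (C : Int) (ht : 0 < totalOf heights) (x : Int)
    (hx : x ∈ candsOf heights C) : 0 ≤ x ∧ x < totalOf heights := by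
  rcases (mem_candsOf heights C x).mp hx with h | ⟨_, h2, h3⟩
  · omega
  · omega

-- last/first element bridges between Python indexing and the closed-form Pre_
theorem last_bridge (heights : List Int) (h : heights ≠ []) :
    PySem.List.pyGetD heights (-1) 0 = heights.getLastD 0 := by
  rw [PySem.List.pyGetD_neg_one heights 0 h, List.getLastD_eq_getLast?,
    List.getLast?_eq_getLast_of_ne_nil h]
  rfl

theorem head_bridge (heights : List Int) (h : heights ≠ []) :
    PySem.List.pyGetD heights 0 0 = heights.headD 0 := by
  cases heights with
  | nil => exact absurd rfl h
  | cons a as => rw [PySem.List.pyGetD_zero]; rfl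

-- ===== VERDICT (by name: the statement is the Claim_ definition above) =====
theorem get_min_discomfort_spec : Claim_equal_get_min_discomfort := by
  unfold Claim_equal_get_min_discomfort
  intro heights R C _hDom hPre
  unfold Spec_get_min_discomfort
  obtain ⟨hne, hPC⟩ := hPre
  rw [A_unfold, B_unfold]
  by_cases ht : totalOf heights ≤ 0
  · rw [if_pos ht, gmd_loop, dif_neg (by omega : ¬ (0 : Int) < totalOf heights)]
  · rw [if_neg ht]
    push_neg at ht
    have hC : 1 ≤ C := by
      rcases hPC with h | h
      · exact h
      · exfalso
        have h1 := last_bridge heights hne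
        have h2 := head_bridge heights hne
        have : totalOf heights ≤ 0 := by rw [totalOf, h1, h2]; omega
        omega
    set cands := candsOf heights C with hcands
    set L : Int := (cands.length : Int) with hL
    have hLnn : 0 ≤ L := by rw [hL]; exact_mod_cast Int.natCast_nonneg _
    set lo := bsl_loop heights R C cands 0 L with hlo
    set x := gmd_loop heights R C 0 (totalOf heights) with hx
    obtain ⟨a1, a2, a3, a4⟩ := gmd_loop_char heights R C hC 0 (totalOf heights) (by omega)
    obtain ⟨b1, b2, b3, b4⟩ :=
      bsl_loop_char heights R C hC cands (candsOf_pairwise heights C) 0 L (le_refl 0) hLnn (le_refl L)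
    rw [← hx] at a1 a2 a3 a4
    rw [← hlo] at b1 b2 b3 b4
    by_cases hloL : lo < L
    · rw [if_pos hloL]
      set c := PySem.List.pyGetD cands lo 0 with hc
      have hcmem : c ∈ cands := by
        rw [hc, PySem.List.pyGetD_eq_getElem cands 0 b1 hloL]
        exact List.getElem_mem _
      have hcb := cands_bounds heights C ht c hcmem
      have hcP : R ≤ gcount heights C c 0 := b4 hloL
      have hxc : x ≤ c := by
        by_contra hcx
        push_neg at hcx
        exact a3 c hcb.1 hcx hcP
      have hcx : c ≤ x := by
        by_contra hgt
        push_neg at hgt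
        have hxP : R ≤ gcount heights C x 0 := a4 (by omega)
        obtain ⟨c', hc'mem, hc'le, hc'P⟩ :=
          exists_cand_le heights R C x a1 (by omega) hxP
        obtain ⟨j, hjlt, hjeq⟩ := List.mem_iff_getElem.mp hc'mem
        have hjv : PySem.List.pyGetD cands (j : Int) 0 = c' := by
          rw [PySem.List.pyGetD_eq_getElem cands 0 (by omega) (by exact_mod_cast hjlt)]
          simpa using hjeq
        have hq : R ≤ gcount heights C (PySem.List.pyGetD cands (j : Int) 0) 0 := by
          rw [hjv]; exact hc'P
        have hjlo : lo ≤ (j : Int) := by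
          by_contra hjlt2
          push_neg at hjlt2
          exact b3 (j : Int) (by omega) hjlt2 hq
        have hmono : c ≤ c' := by
          rw [← hjv, hc]
          exact cands_mono cands (candsOf_pairwise heights C) lo (j : Int) b1 hjlo
            (by exact_mod_cast hjlt)
        omega
      omega
    · rw [if_neg hloL]
      by_contra hxt
      have hxlt : x < totalOf heights := lt_of_le_of_ne a2 hxt
      have hxP : R ≤ gcount heights C x 0 := a4 hxlt
      obtain ⟨c', hc'mem, _, hc'P⟩ := exists_cand_le heights R C x a1 hxlt hxP
      obtain ⟨j, hjlt, hjeq⟩ := List.mem_iff_getElem.mp hc'mem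
      have hjv : PySem.List.pyGetD cands (j : Int) 0 = c' := by
        rw [PySem.List.pyGetD_eq_getElem cands 0 (by omega) (by exact_mod_cast hjlt)]
        simpa using hjeq
      have hq : R ≤ gcount heights C (PySem.List.pyGetD cands (j : Int) 0) 0 := by
        rw [hjv]; exact hc'P
      have hjL : (j : Int) < L := by rw [hL]; exact_mod_cast hjlt
      exact b3 (j : Int) (by omega) (by omega) hq
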